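-- pv_equiv track=rewrite | github.com/benjaminzeman/ofitec.ai | backend/tests/test_ar_rules_new_metrics.py | streak_length
-- ===== SOURCE A (Python) =====
-- def streak_length(values):
--     if len(values) < 2:
--         return 0
--     direction = 0  # 1 up, -1 down
--     length = 0
--     for i in range(len(values) - 1, 0, -1):
--         cur = values[i]
--         prev = values[i - 1]
--         if cur > prev:
--             if direction in (0, 1):
--                 direction = 1
--                 length += 1
--             else:
--                 break
--         elif cur < prev:
--             if direction in (0, -1):
--                 direction = -1
--                 length += 1
--             else:
--                 break
--         else:
--             break
--     if length == 0:
--         return 0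
--     return length + 1
-- ===== SOURCE B (Python) =====
-- def streak_length(values):
--     # Single FORWARD pass over adjacent pairs, maintaining the strictly
--     # monotonic run ending at the current position (direction, count);
--     # a tie or direction change resets it.  The answer is the final run.
--     direction = 0
--     count = 0
--     for a, b in zip(values, values[1:]):
--         s = (b > a) - (b < a)
--         if s == 0:
--             direction, count = 0, 0
--         elif s == direction:
--             count += 1
--         else:
--             direction, count = s, 1
--     return count + 1 if count else 0
-- ===== Notes on version B (the rewrite author's own statement) =====
-- stated objective: alternative
-- what changed: B replaces A's backward index walk with early break by a single forward fold over adjacent pairs that maintains (direction, length) of the monotonic run ending at the current position, resetting on a tie or direction change; the final run length is the answer.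
import Mathlib
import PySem

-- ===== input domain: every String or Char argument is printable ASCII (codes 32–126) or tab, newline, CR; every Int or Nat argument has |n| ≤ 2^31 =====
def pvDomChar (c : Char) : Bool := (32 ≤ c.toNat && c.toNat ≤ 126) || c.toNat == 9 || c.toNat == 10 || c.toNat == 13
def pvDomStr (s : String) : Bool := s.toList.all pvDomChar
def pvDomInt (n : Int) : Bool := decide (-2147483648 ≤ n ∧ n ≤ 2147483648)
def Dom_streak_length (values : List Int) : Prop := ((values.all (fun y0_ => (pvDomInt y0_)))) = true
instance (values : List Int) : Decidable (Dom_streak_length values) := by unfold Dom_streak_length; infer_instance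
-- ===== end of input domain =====

-- B scans FORWARD over adjacent pairs, carrying the monotonic run ending at the
-- current position and resetting it on a tie or direction change, instead of
-- A's backward walk with early break (a different decomposition; no speed claim).

-- ===== PORT A =====
-- A's backward index loop with break: recursion over the countdown range list.
-- Indices in range(len-1, 0, -1) are always in bounds, so `.getD 0` is never the
-- default branch (Python raises only out of range, which cannot happen here).
def streakALoop (values : List Int) : List Int → Int → Int → Int
  | [], _, length => length
  | i :: rest, direction, length =>
    let cur := (PySem.List.pyGet? values i).getD 0
    let prev := (PySem.List.pyGet? values (i - 1)).getD 0
    if cur > prev then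
      if direction = 0 ∨ direction = 1 then streakALoop values rest 1 (length + 1) else length
    else if cur < prev then
      if direction = 0 ∨ direction = -1 then streakALoop values rest (-1) (length + 1) else length
    else length

def streak_length (values : List Int) : Int :=
  if (values.length : Int) < 2 then 0
  else
    let length := streakALoop values (PySem.List.pyRange ((values.length : Int) - 1) 0 (-1)) 0 0
    if length = 0 then 0 else length + 1

-- ===== PORT B =====
-- Source B's loop body: s = (b > a) - (b < a), then reset / extend / restart the run
def altStep (st : Int × Int) (p : Int × Int) : Int × Int :=
  let s := (if p.1 < p.2 then (1 : Int) else 0) - (if p.2 < p.1 then 1 else 0)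
  if s = 0 then (0, 0)
  else if s = st.1 then (st.1, st.2 + 1)
  else (s, 1)

def streak_length_alt (values : List Int) : Int :=
  let st := (List.zip values (PySem.List.slice values (some 1) none)).foldl altStep (0, 0)
  if st.2 ≠ 0 then st.2 + 1 else 0

-- ===== PRECONDITION & SPEC =====
def Spec_streak_length (values : List Int) (out : Int) : Prop := out = streak_length_alt values
instance (values : List Int) (out : Int) : Decidable (Spec_streak_length values out) := by unfold Spec_streak_length; infer_instance

-- ===== CLAIM (what is proved, stated in full; the proofs are below) =====
def Claim_equal_streak_length : Prop := ∀ (values : List Int), Dom_streak_length values → Spec_streak_length values (streak_length values)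

-- ===== LEMMAS AND PROOFS =====

-- the comparison sign of an adjacent pair
def pvSign (a b : Int) : Int := (if a < b then 1 else 0) - (if b < a then 1 else 0)

-- B's step seen on the sign alone
def sStep (st : Int × Int) (s : Int) : Int × Int :=
  if s = 0 then (0, 0) else if s = st.1 then (st.1, st.2 + 1) else (s, 1)

-- length of the run of `last` at the front of a (reversed) sign list
def trailingRun (last : Int) : List Int → Int
  | [] => 0
  | s :: rest => if s ≠ last then 0 else trailingRun last rest + 1

-- A's loop re-expressed on the (reversed) sign list instead of on indices
def genLoop : List Int → Int → Int → Int
  | [], _, len => len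
  | s :: rest, d, len =>
    if 0 < s then
      if d = 0 ∨ d = 1 then genLoop rest 1 (len + 1) else len
    else if s < 0 then
      if d = 0 ∨ d = -1 then genLoop rest (-1) (len + 1) else len
    else len

theorem pvSign_cases (a b : Int) : pvSign a b = 1 ∨ pvSign a b = 0 ∨ pvSign a b = -1 := by
  unfold pvSign; split_ifs <;> omega

theorem signs_mem : ∀ (xs ys : List Int), ∀ x ∈ List.zipWith pvSign xs ys,
    x = 1 ∨ x = 0 ∨ x = -1
  | [], _, x, h => by simp at h
  | _ :: _, [], x, h => by simp at h
  | a :: xs, b :: ys, x, h => by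
    rcases List.mem_cons.mp h with h | h
    · subst h; exact pvSign_cases a b
    · exact signs_mem xs ys x h

theorem trailingRun_nonneg (last : Int) (l : List Int) : 0 ≤ trailingRun last l := by
  induction l with
  | nil => simp [trailingRun]
  | cons s rest ih => simp only [trailingRun]; split <;> omega

theorem genLoop_eq_trailingRun (s : Int) (hs : s = 1 ∨ s = -1) (rest : List Int) :
    (∀ x ∈ rest, x = 1 ∨ x = 0 ∨ x = -1) →
    ∀ len, genLoop rest s len = len + trailingRun s rest := by
  induction rest with
  | nil => intro _ len; simp [genLoop, trailingRun]
  | cons t r ih =>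
    intro hmem len
    have ht := hmem t List.mem_cons_self
    have hr := fun x hx => hmem x (List.mem_cons_of_mem _ hx)
    simp only [genLoop, trailingRun]
    rcases hs with h | h <;> subst h <;> rcases ht with h' | h' | h' <;> subst h' <;>
      norm_num <;> rw [ih hr] <;> omega

theorem streakALoop_eq_genLoop (values : List Int) (j : Nat)
    (hj : (j : Int) ≤ (values.length : Int) - 1) :
    ∀ d len,
      streakALoop values (PySem.List.pyRange (j : Int) 0 (-1)) d len =
        genLoop ((List.zipWith pvSign values (values.drop 1)).take j).reverse d len := by
  induction j with
  | zero =>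
    intro d len
    rw [PySem.List.pyRange_neg_one_eq_nil (by omega)]
    simp [streakALoop, genLoop]
  | succ j ih =>
    intro d len
    have hlen : (List.zipWith pvSign values (values.drop 1)).length = values.length - 1 := by
      simp only [List.length_zipWith, List.length_drop]; omega
    have hj' : j < (List.zipWith pvSign values (values.drop 1)).length := by
      rw [hlen]; omega
    have hjv : j + 1 < values.length := by omega
    have hc : ((j + 1 : Nat) : Int) = (j : Int) + 1 := by omega
    rw [hc, PySem.List.pyRange_neg_one_cons (by omega),
      show ((j : Int) + 1 - 1) = (j : Int) by ring]
    simp only [streakALoop]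
    have hcur : (PySem.List.pyGet? values ((j : Int) + 1)).getD 0 = values[j + 1] := by
      rw [← hc, PySem.List.pyGet?_natCast]
      simp [List.getElem?_eq_getElem hjv]
    have hprev : (PySem.List.pyGet? values ((j : Int) + 1 - 1)).getD 0 = values[j] := by
      rw [show ((j : Int) + 1 - 1) = ((j : Nat) : Int) by omega,
        PySem.List.pyGet?_natCast]
      simp [List.getElem?_eq_getElem (by omega : j < values.length)]
    have hsig : (List.zipWith pvSign values (values.drop 1))[j] = pvSign values[j] values[j + 1] := by
      rw [List.getElem_zipWith]
      congr 1
      rw [List.getElem_drop]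
      congr 1
      omega
    rw [List.take_succ_eq_append_getElem hj', List.reverse_append]
    simp only [List.reverse_cons, List.reverse_nil, List.nil_append, List.singleton_append,
      genLoop, hsig]
    rw [hcur, hprev]
    by_cases hlt : values[j] < values[j + 1]
    · have h1 : (0 : Int) < pvSign values[j] values[j + 1] := by simp [pvSign, hlt]; omega
      rw [if_pos hlt, if_pos h1]
      split_ifs with hd
      · exact ih (by omega) 1 (len + 1)
      · rfl
    · by_cases hgt : values[j + 1] < values[j]
      · have h1 : ¬ (0 : Int) < pvSign values[j] values[j + 1] := by
          simp [pvSign, hlt, hgt]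
        have h2 : pvSign values[j] values[j + 1] < 0 := by
          simp [pvSign, hlt, hgt]
        rw [if_neg (by omega), if_pos hgt, if_neg h1, if_pos h2]
        split_ifs with hd
        · exact ih (by omega) (-1) (len + 1)
        · rfl
      · have h0 : pvSign values[j] values[j + 1] = 0 := by
          simp [pvSign, hlt, hgt]
        rw [if_neg (by omega), if_neg (by omega), h0]
        norm_num

-- B's fold over pairs equals the fold of sStep over the sign list
theorem zip_fold_eq : ∀ (xs ys : List Int) (st : Int × Int),
    (List.zip xs ys).foldl altStep st = (List.zipWith pvSign xs ys).foldl sStep st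
  | [], _, st => by cases ‹List Int› <;> rfl
  | _ :: _, [], st => rfl
  | a :: xs, b :: ys, st => by
    show (List.zip xs ys).foldl altStep (altStep st (a, b)) =
      (List.zipWith pvSign xs ys).foldl sStep (sStep st (pvSign a b))
    rw [show altStep st (a, b) = sStep st (pvSign a b) from rfl, zip_fold_eq xs ys]

-- characterisation of B's fold: the state is determined by the trailing run
theorem fold_char (L : List Int) :
    L.foldl sStep (0, 0) =
      (match L.reverse with
        | [] => ((0 : Int), (0 : Int))
        | s :: r => if s = 0 then (0, 0) else (s, trailingRun s (s :: r))) := by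
  induction L using List.reverseRecOn with
  | nil => rfl
  | append_singleton L t ih =>
    rw [List.foldl_append, List.foldl_cons, List.foldl_nil, ih, List.reverse_append]
    simp only [List.reverse_cons, List.reverse_nil, List.nil_append, List.singleton_append]
    rcases hL : L.reverse with _ | ⟨s, r⟩
    · by_cases ht : t = 0
      · subst ht; simp [sStep]
      · simp [sStep, ht, trailingRun]
    · by_cases hs : s = 0
      · subst hs
        by_cases ht : t = 0
        · subst ht; simp [sStep]
        · simp [sStep, ht, trailingRun, Ne.symm ht]
      · by_cases ht : t = 0
        · subst ht; simp [sStep]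
        · by_cases hst : t = s
          · subst hst; simp [sStep, ht, trailingRun]
          · simp [sStep, ht, hs, hst, trailingRun, Ne.symm hst]

-- ===== VERDICT (by name: the statement is the Claim_ definition above) =====
theorem streak_length_spec : Claim_equal_streak_length := by
  intro values _
  unfold Spec_streak_length
  have hslice : PySem.List.slice values (some 1) none = values.drop 1 := by
    simp [pysem]
  simp only [streak_length, streak_length_alt, hslice, zip_fold_eq]
  by_cases hn : ((values.length : Int) < 2)
  · rw [if_pos hn]
    have hz : List.zipWith pvSign values (values.drop 1) = [] := by
      apply List.eq_nil_of_length_eq_zero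
      simp [List.length_zipWith]
      omega
    rw [hz]
    simp
  · rw [if_neg hn]
    have hn2 : 2 ≤ values.length := by omega
    have hlen : (List.zipWith pvSign values (values.drop 1)).length = values.length - 1 := by
      simp only [List.length_zipWith, List.length_drop]; omega
    rw [show ((values.length : Int) - 1) = (((values.length - 1 : Nat)) : Int) by omega,
      streakALoop_eq_genLoop values (values.length - 1) (by omega),
      List.take_of_length_le (by omega)]
    obtain ⟨s, rest, hr⟩ :
        ∃ s rest, (List.zipWith pvSign values (values.drop 1)).reverse = s :: rest := by
      rcases h : (List.zipWith pvSign values (values.drop 1)).reverse with _ | ⟨s, rest⟩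
      · exfalso
        have := congrArg List.length h
        simp at this
        omega
      · exact ⟨s, rest, rfl⟩
    rw [hr]
    have hmem : ∀ x ∈ rest, x = 1 ∨ x = 0 ∨ x = -1 := by
      intro x hx
      refine signs_mem values (values.drop 1) x ?_
      rw [← List.mem_reverse, hr]
      exact List.mem_cons_of_mem _ hx
    have hsmem : s = 1 ∨ s = 0 ∨ s = -1 := by
      refine signs_mem values (values.drop 1) s ?_
      rw [← List.mem_reverse, hr]
      exact List.mem_cons_self
    rcases hsmem with h1 | h0 | hm1
    · subst h1
      have hB1 : (List.zipWith pvSign values (values.drop 1)).foldl sStep (0, 0) =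
          (1, trailingRun 1 rest + 1) := by
        rw [fold_char, hr]; simp [trailingRun]
      have hA : genLoop (1 :: rest) 0 0 = 1 + trailingRun 1 rest := by
        simp only [genLoop]
        norm_num
        exact genLoop_eq_trailingRun 1 (Or.inl rfl) rest hmem 1
      have hnn := trailingRun_nonneg 1 rest
      rw [hB1, hA, if_neg (by omega), if_pos (by simp; omega)]
      omega
    · subst h0
      have hB0 : (List.zipWith pvSign values (values.drop 1)).foldl sStep (0, 0) = (0, 0) := by
        rw [fold_char, hr]; simp
      rw [hB0]
      simp [genLoop]
    · subst hm1
      have hBm : (List.zipWith pvSign values (values.drop 1)).foldl sStep (0, 0) =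
          (-1, trailingRun (-1) rest + 1) := by
        rw [fold_char, hr]; simp [trailingRun]
      have hA : genLoop (-1 :: rest) 0 0 = 1 + trailingRun (-1) rest := by
        simp only [genLoop]
        norm_num
        exact genLoop_eq_trailingRun (-1) (Or.inr rfl) rest hmem 1
      have hnn := trailingRun_nonneg (-1) rest
      rw [hBm, hA, if_neg (by omega), if_pos (by simp; omega)]
      omega
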